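-- pv_equiv track=rewrite | github.com/agirishkumar/Data-Structure-And-Algorithms | insertion_sort_tracking.py | insertion_sort_track
-- ===== SOURCE A (Python) =====
-- def insertion_sort_track(A):
--   """
--   Function to perform insertion sort on a list and track the number of comparisons and shifts made.
--
--   Parameters:
--   A (list): The list to be sorted.
--
--   Returns:
--   tuple: A tuple containing the sorted list, the number of comparisons made, and the number of shifts made.
--   """
--   comparisons = 0
--   shifts = 0
--   for j in range(1, len(A)):
--     key = A[j]
--     i = j - 1
--     while i >= 0:
--       comparisons += 1  # Increment comparisons here
--       if A[i] > key:
--         A[i + 1] = A[i]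
--         shifts += 1  # Increment shifts for each assignment
--         i = i - 1
--       else:
--         break
--     A[i + 1] = key
--     shifts += 1
--   return (A, comparisons, shifts)
-- ===== SOURCE B (Python) =====
-- def insertion_sort_track(A):
--   """Same result via closed-form counts: shifts = inversions + (n-1),
--   comparisons = inversions + #{j >= 1 : A[j] >= min(A[:j])}; list via sorted().
--   Mutates A in place like the original (A[:] = sorted list)."""
--   n = len(A)
--   inv = 0
--   for j in range(n):
--     for i in range(j):
--       if A[i] > A[j]:
--         inv += 1
--   comps = inv
--   if n > 0:
--     m = A[0]
--     for x in A[1:]: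
--       if x >= m:
--         comps += 1
--       else:
--         m = x
--   shifts = inv + (n - 1 if n > 0 else 0)
--   A[:] = sorted(A)
--   return (A, comps, shifts)
-- ===== Notes on version B (the rewrite author's own statement) =====
-- stated objective: alternative
-- what changed: B does not simulate the insertion sort: it counts the strict inversions with a direct pairwise scan, derives comparisons as inversions plus a running-prefix-minimum break count, derives shifts as inversions plus n-1, and obtains the list with sorted().
import Mathlib
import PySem

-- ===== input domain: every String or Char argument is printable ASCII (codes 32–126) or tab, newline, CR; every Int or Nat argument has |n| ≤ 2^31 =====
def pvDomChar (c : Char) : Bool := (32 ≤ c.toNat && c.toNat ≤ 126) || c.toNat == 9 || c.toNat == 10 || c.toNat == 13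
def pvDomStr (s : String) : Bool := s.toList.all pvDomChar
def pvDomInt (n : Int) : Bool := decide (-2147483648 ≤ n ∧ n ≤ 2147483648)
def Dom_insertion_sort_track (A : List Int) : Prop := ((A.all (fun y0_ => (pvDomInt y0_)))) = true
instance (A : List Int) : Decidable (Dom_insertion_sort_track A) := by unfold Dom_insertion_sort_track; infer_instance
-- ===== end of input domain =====

-- B replaces the insertion-sort simulation by sorted() plus closed-form counters
-- (shifts = inversions + (n-1), comparisons = inversions + prefix-min break count).
-- Python A mutates its argument in place; the equivalence proved here is about the
-- return value (Python B performs the analogous in-place update A[:] = sorted list).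

-- ===== PORT A =====
-- inner while-loop of A: state (arr, i, comparisons, shifts)
def pvLoopA (key : Int) (arr : List Int) (i : Int) (comps shifts : Int) :
    List Int × Int × Int × Int :=
  if h : 0 ≤ i then
    if PySem.List.pyGetD arr i 0 > key then
      pvLoopA key (arr.set (i + 1).toNat (PySem.List.pyGetD arr i 0)) (i - 1) (comps + 1) (shifts + 1)
    else (arr, i, comps + 1, shifts)
  else (arr, i, comps, shifts)
termination_by (i + 1).toNat
decreasing_by omega

-- body of A's outer `for j in range(1, len(A))` loop
def pvStepA (st : List Int × Int × Int) (j : Int) : List Int × Int × Int :=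
  let key := PySem.List.pyGetD st.1 j 0
  let r := pvLoopA key st.1 (j - 1) st.2.1 st.2.2
  (r.1.set (r.2.1 + 1).toNat key, r.2.2.1, r.2.2.2 + 1)

def insertion_sort_track (A : List Int) : List Int × Int × Int :=
  (PySem.List.pyRange 1 (A.length : Int) 1).foldl pvStepA (A, 0, 0)

-- ===== PORT B =====
-- B's nested inversion-counting loops
def pvInvB (A : List Int) (n : Int) : Int :=
  (PySem.List.pyRange 0 n 1).foldl
    (fun c j =>
      (PySem.List.pyRange 0 j 1).foldl
        (fun c i => if PySem.List.pyGetD A i 0 > PySem.List.pyGetD A j 0 then c + 1 else c) c)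
    0

-- body of B's running-minimum loop: state (comps, m)
def pvBrkStep (cm : Int × Int) (x : Int) : Int × Int :=
  if x ≥ cm.2 then (cm.1 + 1, cm.2) else (cm.1, x)

def insertion_sort_track_alt (A : List Int) : List Int × Int × Int :=
  let n : Int := A.length
  let inv := pvInvB A n
  let cm : Int × Int :=
    if 0 < n then
      (PySem.List.slice A (some 1) none).foldl pvBrkStep (inv, PySem.List.pyGetD A 0 0)
    else (inv, 0)
  (PySem.List.sorted A (fun x => x) false, cm.1, inv + (if 0 < n then n - 1 else 0))

-- ===== PRECONDITION & SPEC =====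
def Spec_insertion_sort_track (A : List Int) (out : List Int × Int × Int) : Prop := out = insertion_sort_track_alt A
instance (A : List Int) (out : List Int × Int × Int) : Decidable (Spec_insertion_sort_track A out) := by unfold Spec_insertion_sort_track; infer_instance

-- ===== CLAIM (what is proved, stated in full; the proofs are below) =====
def Claim_equal_insertion_sort_track : Prop := ∀ (A : List Int), Dom_insertion_sort_track A → Spec_insertion_sort_track A (insertion_sort_track A)

-- ===== LEMMAS AND PROOFS =====

theorem pv_getD_append_cons (M t : List Int) (q : Int) :
    PySem.List.pyGetD (M ++ q :: t) (M.length : Int) 0 = q := by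
  simp [PySem.List.pyGetD_natCast, List.getD_eq_getElem?_getD]

theorem pv_set_append_cons (M t : List Int) (z v : Int) :
    (M ++ z :: t).set M.length v = M ++ v :: t := by
  induction M with
  | nil => simp
  | cons a M ih => simp [ih]

-- inner while loop, fully characterised
theorem pvLoopA_spec (key : Int) :
    ∀ (Q : List Int), (∀ q ∈ Q, key < q) →
    ∀ (P : List Int), (∀ p ∈ P, p ≤ key) → ∀ (z : Int) (rest : List Int) (c s : Int),
    pvLoopA key (P ++ Q ++ z :: rest) ((P.length : Int) + (Q.length : Int) - 1) c s =
      (P ++ (match Q with | [] => z :: rest | q :: _ => q :: (Q ++ rest)),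
       (P.length : Int) - 1,
       c + Q.length + (if P = [] then 0 else 1),
       s + Q.length) := by
  intro Q
  induction Q using List.reverseRecOn with
  | nil =>
    intro _ P hP z rest c s
    rcases P.eq_nil_or_concat with rfl | ⟨P₀, p, rfl⟩
    · rw [pvLoopA]; simp
    · simp only [List.concat_eq_append] at hP ⊢
      have hidx : ((P₀ ++ [p]).length : Int) + (([] : List Int).length : Int) - 1
          = ((P₀.length : Nat) : Int) := by simp
      have hp : p ≤ key := hP p (by simp)
      rw [hidx, pvLoopA]
      have harr : (P₀ ++ [p]) ++ [] ++ z :: rest = P₀ ++ p :: (z :: rest) := by simp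
      rw [dif_pos (by positivity), harr, pv_getD_append_cons]
      rw [if_neg (by omega)]
      simp
  | append_singleton Q₀ q ih =>
    intro hQ P hP z rest c s
    have hq : key < q := hQ q (by simp)
    have harr : P ++ (Q₀ ++ [q]) ++ z :: rest = (P ++ Q₀) ++ q :: (z :: rest) := by simp
    have hidx : (P.length : Int) + ((Q₀ ++ [q]).length : Int) - 1
        = (((P ++ Q₀).length : Nat) : Int) := by simp; omega
    rw [harr, hidx, pvLoopA, dif_pos (by positivity), pv_getD_append_cons, if_pos (by omega)]
    have hset : (((P ++ Q₀).length : Int) + 1).toNat = ((P ++ Q₀) ++ [q]).length := by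
      simp; omega
    have harr2 : ((P ++ Q₀) ++ q :: z :: rest) = (((P ++ Q₀) ++ [q]) ++ z :: rest) := by simp
    rw [harr2, hset, pv_set_append_cons]
    have hidx2 : (((P ++ Q₀).length : Nat) : Int) - 1
        = (P.length : Int) + (Q₀.length : Int) - 1 := by simp
    have harr3 : (((P ++ Q₀) ++ [q]) ++ q :: rest) = P ++ Q₀ ++ (q :: (q :: rest)) := by simp
    rw [hidx2, harr3, ih (fun a ha => hQ a (by simp [ha])) P hP q (q :: rest) (c + 1) (s + 1)]
    cases Q₀ with
    | nil => simp
    | cons q₀ Q' => simp; omega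

-- a Pairwise-sorted list splits at key
theorem pv_sorted_split (key : Int) (S : List Int) (h : S.Pairwise (· ≤ ·)) :
    ∃ P Q, S = P ++ Q ∧ (∀ p ∈ P, p ≤ key) ∧ (∀ q ∈ Q, key < q) := by
  induction S with
  | nil => exact ⟨[], [], by simp, by simp, by simp⟩
  | cons x S ih =>
    rw [List.pairwise_cons] at h
    obtain ⟨P, Q, rfl, hP, hQ⟩ := ih h.2
    by_cases hx : x ≤ key
    · exact ⟨x :: P, Q, by simp, by
        intro p hp
        rcases List.mem_cons.mp hp with rfl | hp
        · exact hx
        · exact hP p hp, hQ⟩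
    · refine ⟨[], x :: (P ++ Q), by simp, by simp, ?_⟩
      intro q hq
      rcases List.mem_cons.mp hq with rfl | hq
      · omega
      · have := h.1 q hq; omega

-- B's inner inversion loop counts the strict inversions ending at j
theorem pvInvB_inner (xs : List Int) (key : Int) :
    ∀ (j : Nat), j ≤ xs.length → ∀ (c : Int),
    (PySem.List.pyRange 0 (j : Int) 1).foldl
        (fun c i => if PySem.List.pyGetD xs i 0 > key then c + 1 else c) c
      = c + ((xs.take j).countP (fun a => decide (key < a)) : Int) := by
  intro j
  induction j with
  | zero => intro _ c; simp [PySem.List.pyRange_one_eq_nil]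
  | succ j ih =>
    intro hj c
    have h1 : ((j : Int) + 1) = ((j + 1 : Nat) : Int) := by push_cast; ring
    rw [← h1, PySem.List.pyRange_one_succ_right (by positivity), List.foldl_append,
      ih (by omega) c]
    have hjlen : j < xs.length := by omega
    have hget : PySem.List.pyGetD xs (j : Int) 0 = xs[j] := by
      simp [PySem.List.pyGetD_natCast, List.getD_eq_getElem?_getD, List.getElem?_eq_getElem hjlen]
    have htake : xs.take (j + 1) = xs.take j ++ [xs[j]] := by
      rw [List.take_add_one]; simp [List.getElem?_eq_getElem hjlen]
    rw [htake]
    simp only [List.foldl_cons, List.foldl_nil, hget, List.countP_append]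
    by_cases hcmp : key < xs[j]
    · rw [if_pos (by omega)]; simp [hcmp]; ring
    · rw [if_neg (by omega)]; simp [hcmp]

def pvBrk (xs : List Int) (cm : Int × Int) : Int × Int := xs.foldl pvBrkStep cm

theorem pvBrk_fst_add (xs : List Int) : ∀ (c m : Int),
    pvBrk xs (c, m) = (c + (pvBrk xs (0, m)).1, (pvBrk xs (0, m)).2) := by
  induction xs with
  | nil => simp [pvBrk]
  | cons x xs ih =>
    intro c m
    have hstep : ∀ d : Int, pvBrk (x :: xs) (d, m) = pvBrk xs (pvBrkStep (d, m) x) := fun _ => rfl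
    rw [hstep c, hstep 0]
    by_cases hx : x ≥ m
    · rw [show pvBrkStep (c, m) x = (c + 1, m) from by simp [pvBrkStep, hx],
        show pvBrkStep (0, m) x = (0 + 1, m) from by simp [pvBrkStep, hx],
        ih (c + 1) m, ih (0 + 1) m]
      simp only [Prod.mk.injEq]
      exact ⟨by omega, trivial⟩
    · rw [show pvBrkStep (c, m) x = (c, x) from by simp [pvBrkStep, hx],
        show pvBrkStep (0, m) x = (0, x) from by simp [pvBrkStep, hx]]
      exact ih c x

theorem pvBrk_min (xs : List Int) : ∀ (c m : Int),
    (pvBrk xs (c, m)).2 ∈ m :: xs ∧ ∀ y ∈ m :: xs, (pvBrk xs (c, m)).2 ≤ y := by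
  induction xs with
  | nil => intro c m; simp [pvBrk]
  | cons x xs ih =>
    intro c m
    have hstep : pvBrk (x :: xs) (c, m) = pvBrk xs (pvBrkStep (c, m) x) := rfl
    rw [hstep]
    by_cases hx : x ≥ m
    · rw [show pvBrkStep (c, m) x = (c + 1, m) from by simp [pvBrkStep, hx]]
      obtain ⟨h1, h2⟩ := ih (c + 1) m
      refine ⟨?_, ?_⟩
      · rcases List.mem_cons.mp h1 with h | h
        · simp [h]
        · simp [h]
      · intro y hy
        rcases List.mem_cons.mp hy with rfl | hy
        · exact h2 y (by simp)
        · rcases List.mem_cons.mp hy with rfl | hy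
          · have := h2 m (by simp); omega
          · exact h2 y (by simp [hy])
    · rw [show pvBrkStep (c, m) x = (c, x) from by simp [pvBrkStep, hx]]
      obtain ⟨h1, h2⟩ := ih c x
      refine ⟨?_, ?_⟩
      · rcases List.mem_cons.mp h1 with h | h
        · simp [h]
        · simp [h]
      · intro y hy
        rcases List.mem_cons.mp hy with rfl | hy
        · have := h2 x (by simp); omega
        · rcases List.mem_cons.mp hy with rfl | hy
          · exact h2 y (by simp)
          · exact h2 y (by simp [hy])

-- the main loop invariant
theorem pv_main (A : List Int) : ∀ (k : Nat), 1 ≤ k → k ≤ A.length →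
    (PySem.List.pyRange 1 (k : Int) 1).foldl pvStepA (A, 0, 0) =
      (PySem.List.sorted (A.take k) (fun x => x) false ++ A.drop k,
       pvInvB A (k : Int) + (pvBrk ((A.take k).tail) (0, PySem.List.pyGetD A 0 0)).1,
       pvInvB A (k : Int) + ((k : Int) - 1)) := by
  intro k hk
  induction k, hk using Nat.le_induction with
  | base =>
    intro hlen
    have hA : A ≠ [] := by intro h; subst h; simp at hlen
    obtain ⟨a, A', rfl⟩ := List.exists_cons_of_ne_nil hA
    rw [PySem.List.pyRange_one_eq_nil (by norm_num)]
    simp only [List.foldl_nil, List.take_succ_cons, List.take_zero, List.drop_succ_cons,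
      List.drop_zero, List.tail_cons, Nat.cast_one]
    have hs1 : (PySem.List.sorted [a] fun x : Int => x) = [a] :=
      PySem.List.sorted_eq_self_of_pairwise [a] (fun x : Int => x) (by simp)
    rw [hs1]
    have hinv : pvInvB (a :: A') (1 : Int) = 0 := by
      unfold pvInvB
      rw [show PySem.List.pyRange 0 1 1 = [0] from by
            simpa using PySem.List.pyRange_one_singleton (a := (0 : Int))]
      simp [PySem.List.pyRange_one_eq_nil]
    rw [hinv]
    simp [pvBrk]
  | succ k hk ih =>
    intro hlen
    have hklen : k < A.length := by omega
    have hA : A ≠ [] := by intro h; subst h; simp at hklen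
    -- snoc the outer range
    have hsnoc : PySem.List.pyRange 1 ((k + 1 : Nat) : Int) 1
        = PySem.List.pyRange 1 (k : Int) 1 ++ [(k : Int)] := by
      push_cast
      exact PySem.List.pyRange_one_succ_right (by exact_mod_cast hk)
    rw [hsnoc, List.foldl_append, ih (by omega), List.foldl_cons, List.foldl_nil]
    -- names
    set S := PySem.List.sorted (A.take k) (fun x => x) false with hS
    have hlenS : S.length = k := by
      rw [hS, PySem.List.length_sorted, List.length_take]; omega
    have hdrop : A.drop k = A[k] :: A.drop (k + 1) := List.drop_eq_getElem_cons hklen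
    have htake : A.take (k + 1) = A.take k ++ [A[k]] := by
      rw [List.take_add_one]; simp [List.getElem?_eq_getElem hklen]
    have hpw : S.Pairwise (· ≤ ·) := by
      simpa using PySem.List.sorted_pairwise (A.take k) (fun x => x)
    obtain ⟨P, Q, hSplit, hP, hQ⟩ := pv_sorted_split A[k] S hpw
    have hPQ : P.length + Q.length = k := by
      have := hlenS; rw [hSplit, List.length_append] at this; omega
    -- the key read by pvStepA
    have hkey : PySem.List.pyGetD (S ++ A.drop k) (k : Int) 0 = A[k] := by
      rw [hdrop, show (k : Int) = (S.length : Int) from by rw [hlenS]]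
      exact pv_getD_append_cons _ _ _
    -- run the inner loop
    have hrun := pvLoopA_spec A[k] Q hQ P hP A[k] (A.drop (k + 1))
      (pvInvB A (k : Int) + (pvBrk ((A.take k).tail) (0, PySem.List.pyGetD A 0 0)).1)
      (pvInvB A (k : Int) + ((k : Int) - 1))
    have harr0 : S ++ A.drop k = P ++ Q ++ (A[k] :: A.drop (k + 1)) := by
      rw [hdrop, hSplit]
    have hidx0 : (k : Int) - 1 = (P.length : Int) + (Q.length : Int) - 1 := by
      push_cast [← hPQ]; ring
    -- new sorted prefix
    have hsortednew : PySem.List.sorted (A.take (k + 1)) (fun x => x) false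
        = P ++ A[k] :: Q := by
      apply PySem.List.sorted_id_eq_of_perm_of_pairwise
      · have hSP : (P ++ Q).Perm (A.take k) := by
          rw [← hSplit]; exact PySem.List.sorted_perm (A.take k) _ _
        have h3 : (A[k] :: A.take k).Perm (A.take (k + 1)) := by
          rw [htake]
          exact (List.perm_append_singleton _ _).symm
        exact List.perm_middle.trans ((hSP.cons _).trans h3)
      · rw [List.pairwise_append]
        have hPQpw := hSplit ▸ hpw
        rw [List.pairwise_append] at hPQpw
        refine ⟨hPQpw.1, ?_, ?_⟩
        · rw [List.pairwise_cons]
          exact ⟨fun q hq => le_of_lt (hQ q hq), hPQpw.2.1⟩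
        · intro p hp b hb
          rcases List.mem_cons.mp hb with rfl | hb
          · exact hP p hp
          · exact le_of_lt (lt_of_le_of_lt (hP p hp) (hQ b hb))
    -- inversion count snoc
    have hcntS : ((A.take k).countP (fun a => decide (A[k] < a)) : Int) = (Q.length : Int) := by
      have hperm : (A.take k).countP (fun a => decide (A[k] < a))
          = S.countP (fun a => decide (A[k] < a)) :=
        (List.Perm.countP_eq _ (PySem.List.sorted_perm (A.take k) _ _)).symm
      rw [hperm, hSplit, List.countP_append,
        List.countP_eq_zero.mpr (by intro p hp; simpa using not_lt.mpr (hP p hp)),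
        List.countP_eq_length.mpr (by intro q hq; simpa using hQ q hq)]
      simp
    have hinvsnoc : pvInvB A ((k + 1 : Nat) : Int) = pvInvB A (k : Int) + (Q.length : Int) := by
      unfold pvInvB
      rw [show ((k + 1 : Nat) : Int) = (k : Int) + 1 from by push_cast; ring,
        PySem.List.pyRange_one_succ_right (by positivity), List.foldl_append,
        List.foldl_cons, List.foldl_nil,
        pvInvB_inner A (PySem.List.pyGetD A (k : Int) 0) k (by omega)]
      have : PySem.List.pyGetD A (k : Int) 0 = A[k] := by
        simp [PySem.List.pyGetD_natCast, List.getD_eq_getElem?_getD, List.getElem?_eq_getElem hklen]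
      rw [this, hcntS]
    -- break-count snoc
    have hm0 : PySem.List.pyGetD A 0 0 = A[0] := by
      simp [PySem.List.pyGetD_zero, List.getD_eq_getElem?_getD,
        List.getElem?_eq_getElem (by omega : 0 < A.length)]
    have htail : (A.take k) = A[0] :: (A.take k).tail := by
      obtain ⟨a, A', rfl⟩ := List.exists_cons_of_ne_nil hA
      cases k with
      | zero => omega
      | succ k' => simp
    have htailsnoc : (A.take (k + 1)).tail = (A.take k).tail ++ [A[k]] := by
      rw [htake, htail]; simp
    have hbrksnoc : pvBrk ((A.take (k + 1)).tail) (0, PySem.List.pyGetD A 0 0)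
        = pvBrkStep (pvBrk ((A.take k).tail) (0, PySem.List.pyGetD A 0 0)) A[k] := by
      rw [htailsnoc]; unfold pvBrk; rw [List.foldl_append]; simp
    have htail' : A.take k = PySem.List.pyGetD A 0 0 :: (A.take k).tail := by
      rw [hm0]; exact htail
    obtain ⟨hmem, hmin⟩ := pvBrk_min ((A.take k).tail) 0 (PySem.List.pyGetD A 0 0)
    rw [← htail'] at hmem hmin
    have hScond : (P = []) ↔ ¬ (A[k] ≥ (pvBrk ((A.take k).tail) (0, PySem.List.pyGetD A 0 0)).2) := by
      constructor
      · intro hPnil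
        have hmS : (pvBrk ((A.take k).tail) (0, PySem.List.pyGetD A 0 0)).2 ∈ S := by
          rw [(PySem.List.sorted_perm (A.take k) (fun x => x) false).mem_iff]
          exact hmem
        rw [hSplit, hPnil] at hmS
        have := hQ _ (by simpa using hmS)
        omega
      · intro hge
        rcases P.eq_nil_or_concat with rfl | ⟨P₀, p, hPc⟩
        · rfl
        · exfalso
          have hpS : p ∈ S := by rw [hSplit, hPc]; simp
          have hpA : p ∈ A.take k := (PySem.List.sorted_perm (A.take k) (fun x => x) false).mem_iff.mp hpS
          have h1 := hmin p hpA
          have h2 := hP p (by rw [hPc]; simp)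
          omega
    -- put everything together
    have hkey2 : PySem.List.pyGetD (P ++ Q ++ (A[k] :: A.drop (k + 1))) (k : Int) 0 = A[k] := by
      rw [← harr0]; exact hkey
    have hrun' := hrun
    rw [← hidx0] at hrun'
    simp only [pvStepA]
    rw [harr0, hkey2, hrun']
    simp only [Prod.mk.injEq]
    refine ⟨?_, ?_, ?_⟩
    · have hset : ((P.length : Int) - 1 + 1).toNat = P.length := by omega
      rw [hset, hsortednew]
      cases Q with
      | nil => rw [pv_set_append_cons]; simp
      | cons q Q' => rw [pv_set_append_cons]; simp
    · rw [hinvsnoc, hbrksnoc]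
      unfold pvBrkStep
      by_cases hge : A[k] ≥ (pvBrk ((A.take k).tail) (0, PySem.List.pyGetD A 0 0)).2
      · rw [if_pos hge, if_neg (by rw [hScond]; omega)]
        simp
        ring
      · rw [if_neg hge, if_pos (hScond.mpr hge)]
        simp
        ring
    · rw [hinvsnoc]
      push_cast
      ring

-- ===== VERDICT (by name: the statement is the Claim_ definition above) =====
theorem insertion_sort_track_spec : Claim_equal_insertion_sort_track := by
  intro A _
  unfold Spec_insertion_sort_track
  by_cases hA : A = []
  · subst hA; decide
  · have hlen : 1 ≤ A.length := List.length_pos_of_ne_nil hA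
    have hm := pv_main A A.length hlen le_rfl
    unfold insertion_sort_track
    rw [hm]
    unfold insertion_sort_track_alt
    dsimp only
    have hn : (0 : Int) < (A.length : Int) := by exact_mod_cast hlen
    rw [if_pos hn, if_pos hn, PySem.List.slice_from_one]
    simp only [List.take_length, List.drop_length, List.append_nil]
    have hadd := pvBrk_fst_add A.tail (pvInvB A (A.length : Int)) (PySem.List.pyGetD A 0 0)
    simp only [Prod.mk.injEq]
    refine ⟨trivial, ?_, trivial⟩
    show pvInvB A (A.length : Int) + (pvBrk A.tail (0, PySem.List.pyGetD A 0 0)).1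
      = (List.foldl pvBrkStep (pvInvB A (A.length : Int), PySem.List.pyGetD A 0 0) A.tail).1
    rw [show List.foldl pvBrkStep (pvInvB A (A.length : Int), PySem.List.pyGetD A 0 0) A.tail
        = pvBrk A.tail (pvInvB A (A.length : Int), PySem.List.pyGetD A 0 0) from rfl, hadd]
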